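-- pv_equiv track=rewrite | github.com/emx/sage | integrations/levelup/results/20260301_193831_sqli_1.5/challenges/sage_run_29/app.py | simple_waf
-- ===== SOURCE A (Python) =====
-- def simple_waf(data):
--     # A realistic 'naive' WAF that blocks keywords followed by spaces
--     blacklist = ["SELECT ", "UNION ", "WHERE ", "OR ", "AND ", "--", "INSERT ", "UPDATE ", "DELETE "]
--     if not data:
--         return True
--     for word in blacklist:
--         if word in data.upper():
--             return False
--     return True
-- ===== SOURCE B (Python) =====
-- def simple_waf(data):
--     # Single left-to-right scan: at each position test whether any blacklisted
--     # keyword starts there, instead of one full substring search per keyword.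
--     if not data:
--         return True
--     text = data.upper()
--     words = ("SELECT ", "UNION ", "WHERE ", "OR ", "AND ", "--", "INSERT ", "UPDATE ", "DELETE ")
--     return not any(text.startswith(w, i) for i in range(len(text)) for w in words)
-- ===== Notes on version B (the rewrite author's own statement) =====
-- stated objective: alternative
-- what changed: Replaces one full substring-membership search per blacklist word with a single left-to-right scan of the input that tests at each position whether any keyword starts there.
import Mathlib
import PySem

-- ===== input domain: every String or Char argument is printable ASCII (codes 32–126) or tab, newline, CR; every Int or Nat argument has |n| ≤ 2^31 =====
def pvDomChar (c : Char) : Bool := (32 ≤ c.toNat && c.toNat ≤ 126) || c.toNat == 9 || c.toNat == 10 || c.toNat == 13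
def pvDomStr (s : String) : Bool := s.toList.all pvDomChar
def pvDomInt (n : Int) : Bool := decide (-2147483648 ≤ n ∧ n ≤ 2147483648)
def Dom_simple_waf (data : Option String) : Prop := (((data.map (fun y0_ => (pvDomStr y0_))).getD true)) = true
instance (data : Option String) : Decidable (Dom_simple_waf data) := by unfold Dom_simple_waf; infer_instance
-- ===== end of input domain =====

-- B replaces A's per-keyword substring searches by a single left-to-right scan
-- testing at each position whether any blacklisted keyword starts there (alternative, same cost).

-- ===== PORT A =====
-- the 'for word in blacklist: if word in data.upper(): return False' loop
def wafLoop (up : String) : List String → Bool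
  | [] => true
  | w :: rest => if PySem.Str.isIn w up then false else wafLoop up rest

def simple_waf (data : Option String) : Bool :=
  match data with
  | none => true
  | some s =>
    if s.toList = [] then true
    else wafLoop (PySem.Str.upper s)
      ["SELECT ", "UNION ", "WHERE ", "OR ", "AND ", "--", "INSERT ", "UPDATE ", "DELETE "]

-- ===== PORT B =====
def blacklistChars : List (List Char) :=
  ["SELECT ".toList, "UNION ".toList, "WHERE ".toList, "OR ".toList, "AND ".toList,
   "--".toList, "INSERT ".toList, "UPDATE ".toList, "DELETE ".toList]

-- 'for i in range(len(text)): for w in blacklist: if text.startswith(w, i): return False'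
-- position i ↦ the suffix text.drop i; startswith(w, i) = w is a prefix of that suffix
def scanPos (words : List (List Char)) : List Char → Bool
  | [] => true
  | c :: rest =>
    if words.any (fun w => PySem.Chars.startswith (c :: rest) w) then false
    else scanPos words rest

def simple_waf_alt (data : Option String) : Bool :=
  match data with
  | none => true
  | some s =>
    if s.toList = [] then true
    else scanPos blacklistChars (PySem.Chars.upper s.toList)

-- ===== PRECONDITION & SPEC =====
def Spec_simple_waf (data : Option String) (out : Bool) : Prop := out = simple_waf_alt data
instance (data : Option String) (out : Bool) : Decidable (Spec_simple_waf data out) := by unfold Spec_simple_waf; infer_instance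

-- ===== CLAIM (what is proved, stated in full; the proofs are below) =====
def Claim_equal_simple_waf : Prop := ∀ (data : Option String), Dom_simple_waf data → Spec_simple_waf data (simple_waf data)

-- ===== LEMMAS AND PROOFS =====

-- A's early-return loop is the negated disjunction of the substring tests
theorem wafLoop_eq (up : String) (ws : List String) :
    wafLoop up ws = !ws.any (fun w => PySem.Str.isIn w up) := by
  induction ws with
  | nil => simp [wafLoop]
  | cons w rest ih =>
    simp only [wafLoop]
    split <;> simp_all

-- B's position scan is the negated disjunction of the substring tests (all words nonempty)
theorem scanPos_eq (words : List (List Char)) (hne : ∀ w ∈ words, w ≠ []) :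
    ∀ l : List Char, scanPos words l = !words.any (fun w => PySem.Chars.isIn w l) := by
  intro l
  induction l with
  | nil =>
    simp only [scanPos, Bool.true_eq, Bool.not_eq_true', List.any_eq_false]
    intro w hw
    simp only [PySem.Chars.isIn_iff_infix, List.infix_nil]
    exact hne w hw
  | cons c rest ih =>
    simp only [scanPos]
    have hany : (words.any fun w => PySem.Chars.isIn w (c :: rest)) =
        ((words.any fun w => PySem.Chars.startswith (c :: rest) w) ||
         (words.any fun w => PySem.Chars.isIn w rest)) := by
      rw [Bool.eq_iff_iff]
      simp only [List.any_eq_true, Bool.or_eq_true, PySem.Chars.startswith_iff,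
        PySem.Chars.isIn_iff_infix, List.infix_cons_iff]
      constructor
      · rintro ⟨w, hw, h | h⟩
        · exact Or.inl ⟨w, hw, h⟩
        · exact Or.inr ⟨w, hw, h⟩
      · rintro (⟨w, hw, h⟩ | ⟨w, hw, h⟩)
        · exact ⟨w, hw, Or.inl h⟩
        · exact ⟨w, hw, Or.inr h⟩
    rw [hany]
    split <;> simp_all

-- ===== VERDICT (by name: the statement is the Claim_ definition above) =====
theorem simple_waf_spec : Claim_equal_simple_waf := by
  intro data _
  unfold Spec_simple_waf simple_waf simple_waf_alt
  cases data with
  | none => rfl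
  | some s =>
    by_cases h : s.toList = []
    · simp [h]
    · simp only [h, if_false]
      rw [wafLoop_eq, scanPos_eq blacklistChars (by decide)]
      simp [blacklistChars, PySem.Str.isIn_eq, PySem.Str.toList_upper]
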